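-- pv_equiv track=rewrite | github.com/wyderkat/css-on-diet | CSSOnDiet/cod.py | prefix_it
-- ===== SOURCE A (Python) =====
-- def prefix_it( toprefix, table, text ):
--   byprefix = {}
--   order = [] # because no OrderedDict for 2.6
--   for tp in toprefix:
--     for p in table[ tp ]:
--       if p in byprefix:
--         byprefix[ p ] = byprefix[p].replace( tp, p+tp, 1 )
--       else:
--         byprefix[ p ] = text.replace( tp, p+tp, 1 )
--         order.append( p )
--   result = ""
--   for p in order:
--     result += byprefix[ p ]
--   return result
-- ===== SOURCE B (Python) =====
-- def prefix_it(toprefix, table, text):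
--     # Pass 1: group the tp's by prefix p, in first-appearance order of p.
--     groups = {}
--     for tp in toprefix:
--         for p in table[tp]:
--             groups.setdefault(p, []).append(tp)
--     # Pass 2: each prefix's string is computed independently from text
--     # by folding its own ordered first-occurrence replacements.
--     pieces = []
--     for p, tps in groups.items():
--         s = text
--         for tp in tps:
--             s = s.replace(tp, p + tp, 1)
--         pieces.append(s)
--     return "".join(pieces)
-- ===== Notes on version B (the rewrite author's own statement) =====
-- stated objective: alternative
-- what changed: A interleaves everything in one nested loop over a single mutable byprefix dict plus an explicit order list; B first groups the tps by prefix in one dict-building pass, then in a separate pass computes each prefix's string independently by folding its replacements over text, and joins the pieces in dict insertion order.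
import Mathlib
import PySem

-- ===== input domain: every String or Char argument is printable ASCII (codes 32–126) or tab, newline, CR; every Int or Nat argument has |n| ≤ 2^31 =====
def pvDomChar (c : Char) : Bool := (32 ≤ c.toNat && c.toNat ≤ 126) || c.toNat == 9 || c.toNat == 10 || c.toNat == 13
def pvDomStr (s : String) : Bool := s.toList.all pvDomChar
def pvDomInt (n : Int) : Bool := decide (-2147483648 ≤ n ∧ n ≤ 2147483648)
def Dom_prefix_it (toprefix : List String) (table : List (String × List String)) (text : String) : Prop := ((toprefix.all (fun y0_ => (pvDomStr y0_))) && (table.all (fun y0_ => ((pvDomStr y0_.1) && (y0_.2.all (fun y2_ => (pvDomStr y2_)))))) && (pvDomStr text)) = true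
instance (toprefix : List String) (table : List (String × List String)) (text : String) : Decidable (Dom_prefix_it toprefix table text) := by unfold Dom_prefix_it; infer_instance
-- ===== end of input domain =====

-- B is a two-pass re-decomposition of A (group tps by prefix, then fold each prefix's
-- replacements independently over text); same cost, objective: alternative decomposition.

-- shared primitive: Python's s.replace(old, new, 1) (first occurrence only), on code points.
-- exact: old = "" inserts new once at the front; otherwise the leftmost occurrence is replaced.
def pyReplace1Go (old new : List Char) : List Char → List Char
  | [] => []
  | c :: cs =>
    if old.isPrefixOf (c :: cs) then new ++ (c :: cs).drop old.length
    else c :: pyReplace1Go old new cs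

def pyReplace1 (s old new : List Char) : List Char :=
  if old = [] then new ++ s else pyReplace1Go old new s

-- ===== PORT A =====
-- literal transliteration of A: one dict byprefix updated in encounter order plus an
-- explicit 'order' list, then the result concatenated in 'order'.
-- table[tp] is the Python dict lookup; under Pre_ every tp is a key, so getD is exact.
def prefix_it (toprefix : List String) (table : List (String × List String)) (text : String) : String :=
  let td := PySem.Dict.ofList table
  let st :=
    toprefix.foldl (fun (st : PySem.Dict String (List Char) × List String) tp =>
      (td.getD tp []).foldl (fun st p =>
        match st.1.get? p with
        | some s => (st.1.insert p (pyReplace1 s tp.toList (p.toList ++ tp.toList)), st.2)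
        | none   => (st.1.insert p (pyReplace1 text.toList tp.toList (p.toList ++ tp.toList)), st.2 ++ [p])) st)
      (PySem.Dict.empty, [])
  String.ofList (st.2.foldl (fun r p => r ++ st.1.getD p []) [])

-- ===== PORT B =====
-- literal transliteration of B (Source B): pass 1 groups the tps by prefix p in a dict
-- (setdefault(p, []).append(tp) = modify p [] (· ++ [tp])); pass 2 folds each prefix's
-- replacements over text independently; "".join of the pieces.
def prefix_it_alt (toprefix : List String) (table : List (String × List String)) (text : String) : String :=
  let td := PySem.Dict.ofList table
  let groups :=
    toprefix.foldl (fun (g : PySem.Dict String (List String)) tp =>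
      (td.getD tp []).foldl (fun g p => g.modify p [] (· ++ [tp])) g)
      PySem.Dict.empty
  let pieces := groups.items.map (fun q =>
    q.2.foldl (fun s tp => pyReplace1 s tp.toList (q.1.toList ++ tp.toList)) text.toList)
  String.ofList (PySem.Chars.join [] pieces)

-- ===== PRECONDITION & SPEC =====
-- Pre_ excludes exactly the inputs where Python A raises KeyError: some tp in toprefix
-- is not a key of the table dict.
def Pre_prefix_it (toprefix : List String) (table : List (String × List String)) (text : String) : Prop :=
  ∀ tp ∈ toprefix, (PySem.Dict.ofList table).contains tp = true
instance (toprefix : List String) (table : List (String × List String)) (text : String) : Decidable (Pre_prefix_it toprefix table text) := by unfold Pre_prefix_it; infer_instance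

def pvWitness_prefix_it : List String × (List (String × List String)) × String :=
  (["ab", "c"], [("ab", ["-x-", "y"]), ("c", ["y"])], "zabcab")

def Spec_prefix_it (toprefix : List String) (table : List (String × List String)) (text : String) (out : String) : Prop := out = prefix_it_alt toprefix table text
instance (toprefix : List String) (table : List (String × List String)) (text : String) (out : String) : Decidable (Spec_prefix_it toprefix table text out) := by unfold Spec_prefix_it; infer_instance

-- ===== CLAIM (what is proved, stated in full; the proofs are below) =====
def Claim_equal_prefix_it : Prop := ∀ (toprefix : List String) (table : List (String × List String)) (text : String), Dom_prefix_it toprefix table text → Pre_prefix_it toprefix table text → Spec_prefix_it toprefix table text (prefix_it toprefix table text)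

-- ===== LEMMAS AND PROOFS =====

-- the per-prefix replacement step both ports apply
def prefStep (text0 : List Char) (p : String) : List Char → String → List Char :=
  fun s tp => pyReplace1 s tp.toList (p.toList ++ tp.toList)

-- a nested fold is the fold over the flattened (outer, inner) pair list
theorem nested_foldl {α β σ : Type} (l : List α) (g : α → List β) (f : σ → α → β → σ)
    (init : σ) :
    l.foldl (fun st a => (g a).foldl (fun st b => f st a b) st) init
      = (l.flatMap (fun a => (g a).map (fun b => (a, b)))).foldl (fun st q => f st q.1 q.2) init := by
  induction l generalizing init with
  | nil => rfl
  | cons a l ih => simp only [List.foldl_cons, List.flatMap_cons, List.foldl_append,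
      List.foldl_map, ih]

-- joining with the empty separator is flattening
theorem join_nil_eq_flatten (parts : List (List Char)) :
    PySem.Chars.join [] parts = parts.flatten := by
  induction parts with
  | nil => rfl
  | cons a l ih =>
    cases l with
    | nil => simp [PySem.Chars.join, List.intercalate]
    | cons b m =>
      simpa [PySem.Chars.join, List.intercalate, List.intersperse] using
        congrArg (a ++ ·) (by simpa [PySem.Chars.join, List.intercalate] using ih)

-- the loop invariant: A's (byprefix, order) versus B's groups, over the pair stream
theorem loop_inv (text0 : List Char) (l : List (String × String))
    (bp : PySem.Dict String (List Char)) (ord : List String)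
    (g : PySem.Dict String (List String))
    (hk : ord = g.keys)
    (hv : ∀ p, bp.get? p = (g.get? p).map (fun tps => tps.foldl (prefStep text0 p) text0)) :
    (l.foldl (fun st (q : String × String) =>
        match st.1.get? q.2 with
        | some s => (st.1.insert q.2 (pyReplace1 s q.1.toList (q.2.toList ++ q.1.toList)), st.2)
        | none   => (st.1.insert q.2 (pyReplace1 text0 q.1.toList (q.2.toList ++ q.1.toList)), st.2 ++ [q.2]))
        (bp, ord)).2
      = (l.foldl (fun g (q : String × String) => g.modify q.2 [] (· ++ [q.1])) g).keys
    ∧ ∀ p, (l.foldl (fun st (q : String × String) =>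
        match st.1.get? q.2 with
        | some s => (st.1.insert q.2 (pyReplace1 s q.1.toList (q.2.toList ++ q.1.toList)), st.2)
        | none   => (st.1.insert q.2 (pyReplace1 text0 q.1.toList (q.2.toList ++ q.1.toList)), st.2 ++ [q.2]))
        (bp, ord)).1.get? p
      = ((l.foldl (fun g (q : String × String) => g.modify q.2 [] (· ++ [q.1])) g).get? p).map
          (fun tps => tps.foldl (prefStep text0 p) text0) := by
  induction l generalizing bp ord g with
  | nil => exact ⟨hk, hv⟩
  | cons q l ih =>
    obtain ⟨tp, p⟩ := q
    simp only [List.foldl_cons]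
    have hmod : g.modify p [] (· ++ [tp]) = g.insert p (g.getD p [] ++ [tp]) := rfl
    cases hgp : g.get? p with
    | some tps =>
      have hbp : bp.get? p = some (tps.foldl (prefStep text0 p) text0) := by
        simpa [hgp] using hv p
      have hcont : g.contains p = true := by
        rw [PySem.Dict.contains_eq_isSome_get?, hgp]; rfl
      simp only [hbp, hmod]
      refine ih _ _ _ ?_ ?_
      · rw [hk, PySem.Dict.keys_insert_of_contains g _ hcont]
      · intro p'
        rw [PySem.Dict.get?_insert, PySem.Dict.get?_insert]
        by_cases h : p' = p
        · subst h
          simp [PySem.Dict.getD_of_get?_eq_some g ([] : List String) hgp, prefStep,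
            List.foldl_append]
        · simp only [if_neg h]; exact hv p'
    | none =>
      have hbp : bp.get? p = none := by simpa [hgp] using hv p
      have hcont : g.contains p = false := (PySem.Dict.get?_eq_none_iff_contains g p).1 hgp
      simp only [hbp, hmod]
      refine ih _ _ _ ?_ ?_
      · rw [hk, PySem.Dict.keys_insert_of_not_contains g _ hcont]
      · intro p'
        rw [PySem.Dict.get?_insert, PySem.Dict.get?_insert]
        by_cases h : p' = p
        · subst h
          simp [PySem.Dict.getD_of_not_contains g ([] : List String) hcont, prefStep]
        · simp only [if_neg h]; exact hv p'

-- ===== VERDICT (by name: the statement is the Claim_ definition above) =====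
theorem prefix_it_spec : Claim_equal_prefix_it := by
  intro toprefix table text _hdom _hpre
  simp only [Spec_prefix_it, prefix_it, prefix_it_alt]
  set td := PySem.Dict.ofList table with htd
  set t0 := text.toList with ht0
  -- flatten both nested loops into folds over the same (tp, p) pair stream
  set pairs := toprefix.flatMap (fun tp => (td.getD tp []).map (fun p => (tp, p))) with hpairs
  have hA := nested_foldl toprefix (fun tp => td.getD tp [])
        (fun (st : PySem.Dict String (List Char) × List String) tp p =>
          match st.1.get? p with
          | some s => (st.1.insert p (pyReplace1 s tp.toList (p.toList ++ tp.toList)), st.2)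
          | none   => (st.1.insert p (pyReplace1 t0 tp.toList (p.toList ++ tp.toList)), st.2 ++ [p]))
        (PySem.Dict.empty, [])
  have hB := nested_foldl toprefix (fun tp => td.getD tp [])
        (fun (g : PySem.Dict String (List String)) tp p => PySem.Dict.modify g p [] (· ++ [tp]))
        PySem.Dict.empty
  rw [hA, hB]
  set g := pairs.foldl (fun g (q : String × String) => g.modify q.2 [] (· ++ [q.1]))
      PySem.Dict.empty with hg
  obtain ⟨hord, hval⟩ := loop_inv t0 pairs PySem.Dict.empty [] PySem.Dict.empty rfl
      (by intro p; simp [PySem.Dict.get?_empty])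
  rw [hord, PySem.List.foldl_append_eq_flatMap, List.nil_append, join_nil_eq_flatten]
  have hnd : g.keys.Nodup := by
    rw [hg]
    exact PySem.Dict.nodup_keys_foldl_modify_key pairs (·.2) [] (fun _ q => (· ++ [q.1]))
      PySem.Dict.empty PySem.Dict.nodup_keys_empty
  rw [PySem.Dict.items_eq_map_keys g hnd [], List.map_map, ← List.flatMap_def]
  congr 1
  apply List.flatMap_congr
  intro p hp
  have hsome : ∃ tps, g.get? p = some tps := by
    cases h : g.get? p with
    | some tps => exact ⟨tps, rfl⟩
    | none => exact absurd hp ((PySem.Dict.get?_eq_none_iff_not_mem_keys g p).1 h)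
  obtain ⟨tps, htps⟩ := hsome
  have := hval p
  rw [htps, Option.map_some] at this
  rw [PySem.Dict.getD_of_get?_eq_some _ ([] : List Char) this, Function.comp_apply,
      PySem.Dict.getD_of_get?_eq_some _ ([] : List String) htps]
  rfl
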